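-- pv_equiv track=rewrite | github.com/Tsadoq/check_chatbot | ingestion/parsers/blogpost_ingestion.py | parse_blog_metadata
-- ===== SOURCE A (Python) =====
-- from typing import Dict, List, Tuple
--
-- def parse_blog_metadata(content: str) -> Dict[str, str]:
--     """
--     Parse metadata (title, author, date) and content from blogpost text.
--     :param content: str, the content of the blogpost.
--     :return: dict, a dictionary containing the metadata and content of the blogpost.
--     """
--     metadata = {}
--     lines = content.splitlines()
--     content_start_idx = 0
--
--     for idx, line in enumerate(lines):
--         if line.startswith('>>>>TITLE>>>>'):
--             metadata['title'] = line.replace('>>>>TITLE>>>>', '').strip()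
--         elif line.startswith('>>>>AUTHOR>>>>'):
--             metadata['author'] = line.replace('>>>>AUTHOR>>>>', '').strip()
--         elif line.startswith('>>>>DATE>>>>'):
--             metadata['date'] = line.replace('>>>>DATE>>>>', '').strip()
--             content_start_idx = idx + 1
--             break
--
--     metadata['content'] = '\n'.join(lines[content_start_idx:]).strip()
--     return metadata
-- ===== SOURCE B (Python) =====
-- MARKERS = [('>>>>TITLE>>>>', 'title'), ('>>>>AUTHOR>>>>', 'author'), ('>>>>DATE>>>>', 'date')]
--
-- def parse_blog_metadata(content: str):
--     lines = content.splitlines()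
--     date_idx = next((i for i, l in enumerate(lines) if l.startswith('>>>>DATE>>>>')), -1)
--     header = lines if date_idx < 0 else lines[:date_idx + 1]
--     body = lines if date_idx < 0 else lines[date_idx + 1:]
--     events = [(name, l.replace(marker, '').strip())
--               for l in header for marker, name in MARKERS if l.startswith(marker)]
--     metadata = dict(events)
--     metadata['content'] = '\n'.join(body).strip()
--     return metadata
-- ===== Notes on version B (the rewrite author's own statement) =====
-- stated objective: alternative
-- what changed: A's single enumerate loop with an early break and per-key elif branches is replaced by a decomposition: first find the index of the first date-marker line, split the lines into header and body at that index, collect (key, value) marker events from the header with a comprehension over a marker table, and build the metadata dict with dict(events); content comes from the body slice.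
import Mathlib
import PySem

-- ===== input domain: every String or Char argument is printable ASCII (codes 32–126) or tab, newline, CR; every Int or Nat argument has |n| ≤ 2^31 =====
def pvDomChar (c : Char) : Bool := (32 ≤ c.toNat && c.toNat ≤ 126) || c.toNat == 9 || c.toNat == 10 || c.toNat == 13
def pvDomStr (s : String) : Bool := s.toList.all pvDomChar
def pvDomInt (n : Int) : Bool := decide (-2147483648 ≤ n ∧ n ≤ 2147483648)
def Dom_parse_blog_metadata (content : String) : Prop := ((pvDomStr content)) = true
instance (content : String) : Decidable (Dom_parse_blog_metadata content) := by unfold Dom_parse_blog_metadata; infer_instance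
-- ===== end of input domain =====

-- B replaces A's single loop-with-break by a decomposition: find the first DATE line's index, split into
-- header/body, collect marker events from the header with a comprehension and fold them into a dict (alternative; same cost).

-- ===== PORT A =====
-- A's for-loop with break: returns (metadata dict, content_start_idx).
def pvLoopA : List String → Nat → PySem.Dict String String → PySem.Dict String String × Nat
  | [], _, md => (md, 0)
  | l :: rest, idx, md =>
    if PySem.Str.startswith l ">>>>TITLE>>>>" then
      pvLoopA rest (idx + 1) (md.insert "title" (PySem.Str.strip (PySem.Str.replace l ">>>>TITLE>>>>" "")))
    else if PySem.Str.startswith l ">>>>AUTHOR>>>>" then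
      pvLoopA rest (idx + 1) (md.insert "author" (PySem.Str.strip (PySem.Str.replace l ">>>>AUTHOR>>>>" "")))
    else if PySem.Str.startswith l ">>>>DATE>>>>" then
      (md.insert "date" (PySem.Str.strip (PySem.Str.replace l ">>>>DATE>>>>" "")), idx + 1)
    else
      pvLoopA rest (idx + 1) md

def parse_blog_metadata (content : String) : List (String × String) :=
  let lines := PySem.Str.splitlines content
  let r := pvLoopA lines 0 PySem.Dict.empty
  ((r.1).insert "content"
      (PySem.Str.strip (PySem.Str.join "\n" (PySem.List.slice lines (some (r.2 : Int)) none)))).items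

-- ===== PORT B =====
def pvMarkers : List (String × String) :=
  [(">>>>TITLE>>>>", "title"), (">>>>AUTHOR>>>>", "author"), (">>>>DATE>>>>", "date")]

-- the inner 'for marker, name in MARKERS if l.startswith(marker)' of Source B's comprehension
def pvLineEvents (l : String) : List (String × String) :=
  pvMarkers.filterMap (fun mk =>
    if PySem.Str.startswith l mk.1 then
      some (mk.2, PySem.Str.strip (PySem.Str.replace l mk.1 ""))
    else none)

def parse_blog_metadata_alt (content : String) : List (String × String) :=
  let lines := PySem.Str.splitlines content
  let dateIdx : Int :=
    match lines.findIdx? (fun l => PySem.Str.startswith l ">>>>DATE>>>>") with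
    | some i => (i : Int)
    | none => -1
  let header := if dateIdx < 0 then lines else PySem.List.slice lines none (some (dateIdx + 1))
  let body := if dateIdx < 0 then lines else PySem.List.slice lines (some (dateIdx + 1)) none
  let md := (header.flatMap pvLineEvents).foldl (fun d p => d.insert p.1 p.2) PySem.Dict.empty
  (md.insert "content" (PySem.Str.strip (PySem.Str.join "\n" body))).items

-- ===== PRECONDITION & SPEC =====
def Spec_parse_blog_metadata (content : String) (out : List (String × String)) : Prop := out = parse_blog_metadata_alt content
instance (content : String) (out : List (String × String)) : Decidable (Spec_parse_blog_metadata content out) := by unfold Spec_parse_blog_metadata; infer_instance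

-- ===== CLAIM (what is proved, stated in full; the proofs are below) =====
def Claim_equal_parse_blog_metadata : Prop := ∀ (content : String), Dom_parse_blog_metadata content → Spec_parse_blog_metadata content (parse_blog_metadata content)

-- ===== LEMMAS AND PROOFS =====

-- two of the three markers are never both prefixes of one line
lemma pvDisj (l p q : String) (hp : PySem.Str.startswith l p = true)
    (hq : PySem.Str.startswith l q = true) (hlen : p.toList.length ≤ q.toList.length) :
    p.toList <+: q.toList := by
  rw [PySem.Str.startswith_eq, PySem.Chars.startswith_iff] at hp hq
  exact List.prefix_of_prefix_length_le hp hq hlen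

lemma pvTA (l : String) (h : PySem.Str.startswith l ">>>>TITLE>>>>" = true) :
    PySem.Str.startswith l ">>>>AUTHOR>>>>" = false := by
  by_contra hc
  have := pvDisj l ">>>>TITLE>>>>" ">>>>AUTHOR>>>>" h (by simpa using hc) (by decide)
  revert this; decide

lemma pvTD (l : String) (h : PySem.Str.startswith l ">>>>TITLE>>>>" = true) :
    PySem.Str.startswith l ">>>>DATE>>>>" = false := by
  by_contra hc
  have := pvDisj l ">>>>DATE>>>>" ">>>>TITLE>>>>" (by simpa using hc) h (by decide)
  revert this; decide

lemma pvAD (l : String) (h : PySem.Str.startswith l ">>>>AUTHOR>>>>" = true) :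
    PySem.Str.startswith l ">>>>DATE>>>>" = false := by
  by_contra hc
  have := pvDisj l ">>>>DATE>>>>" ">>>>AUTHOR>>>>" (by simpa using hc) h (by decide)
  revert this; decide

-- A's loop equals B's find-index / header-events / fold decomposition
lemma pvLoopA_eq (ls : List String) : ∀ (idx : Nat) (md : PySem.Dict String String),
    pvLoopA ls idx md =
      match ls.findIdx? (fun l => PySem.Str.startswith l ">>>>DATE>>>>") with
      | none => ((ls.flatMap pvLineEvents).foldl (fun d p => d.insert p.1 p.2) md, 0)
      | some i => (((ls.take (i + 1)).flatMap pvLineEvents).foldl (fun d p => d.insert p.1 p.2) md,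
          idx + i + 1) := by
  induction ls with
  | nil => intro idx md; simp [pvLoopA]
  | cons l rest ih =>
    intro idx md
    rw [List.findIdx?_cons]
    by_cases hT : PySem.Str.startswith l ">>>>TITLE>>>>" = true
    · have hA := pvTA l hT
      have hD := pvTD l hT
      simp only [pvLoopA, hT, hA, hD, if_false, Bool.false_eq_true, ih]
      simp at hT hA hD
      cases hfi : rest.findIdx? (fun l => PySem.Str.startswith l ">>>>DATE>>>>") with
      | none => simp [pvLineEvents, pvMarkers, hT, hA, hD]
      | some i =>
        simp [pvLineEvents, pvMarkers, hT, hA, hD, List.take_succ_cons]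
        omega
    · by_cases hA : PySem.Str.startswith l ">>>>AUTHOR>>>>" = true
      · have hD := pvAD l hA
        simp only [pvLoopA, hT, hA, hD, if_false, Bool.false_eq_true, ih]
        simp at hT hA hD
        cases hfi : rest.findIdx? (fun l => PySem.Str.startswith l ">>>>DATE>>>>") with
        | none => simp [pvLineEvents, pvMarkers, hT, hA, hD]
        | some i =>
          simp [pvLineEvents, pvMarkers, hT, hA, hD, List.take_succ_cons]
          omega
      · by_cases hD : PySem.Str.startswith l ">>>>DATE>>>>" = true
        · simp only [pvLoopA, hT, hA, hD, if_false, Bool.false_eq_true]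
          simp at hT hA hD
          simp [pvLineEvents, pvMarkers, hT, hA, hD]
        · simp only [pvLoopA, hT, hA, hD, if_false, Bool.false_eq_true, ih]
          simp at hT hA hD
          cases hfi : rest.findIdx? (fun l => PySem.Str.startswith l ">>>>DATE>>>>") with
          | none => simp [pvLineEvents, pvMarkers, hT, hA, hD]
          | some i =>
            simp [pvLineEvents, pvMarkers, hT, hA, hD, List.take_succ_cons]
            omega

-- ===== VERDICT (by name: the statement is the Claim_ definition above) =====
theorem parse_blog_metadata_spec : Claim_equal_parse_blog_metadata := by
  intro content _
  unfold Spec_parse_blog_metadata parse_blog_metadata parse_blog_metadata_alt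
  simp only [pvLoopA_eq]
  cases hfi : (PySem.Str.splitlines content).findIdx?
      (fun l => PySem.Str.startswith l ">>>>DATE>>>>") with
  | none =>
    simp [PySem.List.slice_none_none]
  | some i =>
    have h1 : ((i : Int) + 1) = ((i + 1 : Nat) : Int) := by push_cast; ring
    have h2 : ¬ ((i : Int) < 0) := by omega
    simp only [h2, if_false, h1, PySem.List.slice_to_natCast, PySem.List.slice_from_natCast,
      Nat.zero_add]
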